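-- pv_equiv track=rewrite | github.com/Aryudesu/ABC | ABC/400_499/407/D_2.py | calcXOR
-- ===== SOURCE A (Python) =====
-- from collections import defaultdict
-- from itertools import product
--
-- def calcXOR(data: list):
--     result = defaultdict(list)
--     for bits in product([0, 1], repeat = len(data)):
--         tmp = None
--         count = 0
--         for bit, x in zip(bits, data):
--             if bit == 1:
--                 if tmp is None:
--                     tmp = x
--                 else:
--                     tmp ^= x
--                 count += 1
--         if tmp is not None:
--             result[count].append(tmp)
--     return result
-- ===== SOURCE B (Python) =====
-- from collections import defaultdict
--
-- def calcXOR(data: list):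
--     # Doubling: pairs holds (subset size, subset XOR) for every subset of the
--     # suffix processed so far, in the order itertools.product would visit them.
--     pairs = [(0, 0)]
--     for x in reversed(data):
--         pairs += [(c + 1, x ^ v) for (c, v) in pairs]
--     result = defaultdict(list)
--     for c, v in pairs:
--         if c > 0:
--             result[c].append(v)
--     return result
-- ===== Notes on version B (the rewrite author's own statement) =====
-- stated objective: faster
-- what changed: Replaces the itertools.product enumeration with an O(n) inner XOR/count loop per subset by a list-doubling recurrence that extends each (size, xor) pair once per element; intended as faster (O(2^n) vs O(n*2^n)); measured 5.92x at n=16, the largest size both finish (at n=64 the 2^n-sized output lets neither finish).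
import Mathlib
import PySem

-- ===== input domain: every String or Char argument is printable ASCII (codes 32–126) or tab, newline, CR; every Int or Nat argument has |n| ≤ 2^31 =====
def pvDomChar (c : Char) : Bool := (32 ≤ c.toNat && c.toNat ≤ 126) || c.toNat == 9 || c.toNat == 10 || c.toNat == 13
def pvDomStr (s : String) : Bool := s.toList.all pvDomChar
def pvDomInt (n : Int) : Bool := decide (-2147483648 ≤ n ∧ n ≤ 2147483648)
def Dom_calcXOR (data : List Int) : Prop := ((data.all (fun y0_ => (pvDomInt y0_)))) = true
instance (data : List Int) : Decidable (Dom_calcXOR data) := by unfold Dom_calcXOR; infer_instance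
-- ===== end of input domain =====

-- B replaces A's per-subset inner XOR/count loop over itertools.product by a
-- list-doubling construction of all (size, xor) pairs, then groups them once.

-- ===== PORT A =====
-- inner loop body of A: state (tmp, count), input (bit, x)
def pvStepA (s : Option Int × Int) (p : Int × Int) : Option Int × Int :=
  if p.1 == 1 then
    match s.1 with
    | none => (some p.2, s.2 + 1)
    | some t => (some (PySem.Int.bxor t p.2), s.2 + 1)
  else s

-- itertools.product([0, 1], repeat = n), first coordinate slowest
def pvProdBits : Nat → List (List Int)
  | 0 => [[]]
  | n + 1 => ([0, 1] : List Int).flatMap (fun b => (pvProdBits n).map (fun bs => b :: bs))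

-- per-tuple tail of A's loop body: if tmp is not None, result[count].append(tmp)
def pvBodyA (d : PySem.Dict Int (List Int)) (r : Option Int × Int) : PySem.Dict Int (List Int) :=
  match r with
  | (some v, c) => d.modify c [] (· ++ [v])   -- defaultdict(list) append
  | (none, _) => d

def calcXOR (data : List Int) : List (Int × List Int) :=
  ((pvProdBits data.length).foldl
    (fun d bs => pvBodyA d ((bs.zip data).foldl pvStepA (none, 0)))
    PySem.Dict.empty).items

-- ===== PORT B =====
def calcXOR_alt (data : List Int) : List (Int × List Int) :=
  ((data.reverse.foldl
      (fun L x => L ++ L.map (fun p => (p.1 + 1, PySem.Int.bxor x p.2)))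
      [((0 : Int), (0 : Int))]).foldl
    (fun d p => if 0 < p.1 then d.modify p.1 [] (· ++ [p.2]) else d)   -- defaultdict(list) append
    PySem.Dict.empty).items

-- ===== PRECONDITION & SPEC =====
def Spec_calcXOR (data : List Int) (out : List (Int × List Int)) : Prop := out = calcXOR_alt data
instance (data : List Int) (out : List (Int × List Int)) : Decidable (Spec_calcXOR data out) := by unfold Spec_calcXOR; infer_instance

-- ===== CLAIM (what is proved, stated in full; the proofs are below) =====
def Claim_equal_calcXOR : Prop := ∀ (data : List Int), Dom_calcXOR data → Spec_calcXOR data (calcXOR data)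

-- ===== LEMMAS AND PROOFS =====

theorem pv_bxor_eq_xor (a b : Int) : PySem.Int.bxor a b = Int.xor a b := by
  unfold PySem.Int.bxor
  rcases a with a | a <;> rcases b with b | b <;>
    simp [Int.xor, Int.negSucc_eq] <;> omega

theorem pv_bxor_assoc (a b c : Int) :
    PySem.Int.bxor (PySem.Int.bxor a b) c = PySem.Int.bxor a (PySem.Int.bxor b c) := by
  simp only [pv_bxor_eq_xor]
  rcases a with a | a <;> rcases b with b | b <;> rcases c with c | c <;>
    simp [Int.xor, Nat.xor_assoc]

-- the (size, xor) pair list B builds, as a structural recursion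
def pvP : List Int → List (Int × Int)
  | [] => [(0, 0)]
  | x :: r => pvP r ++ (pvP r).map (fun p => (p.1 + 1, PySem.Int.bxor x p.2))

-- sizes are nonnegative, and a size-0 pair carries xor 0
theorem pvP_inv (data : List Int) (p : Int × Int) (hp : p ∈ pvP data) :
    0 ≤ p.1 ∧ (p.1 = 0 → p.2 = 0) := by
  induction data generalizing p with
  | nil => simp [pvP] at hp; simp [hp]
  | cons x r ih =>
    simp only [pvP, List.mem_append, List.mem_map] at hp
    rcases hp with h | ⟨q, hq, rfl⟩
    · exact ih p h
    · have := ih q hq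
      constructor
      · simp; omega
      · intro h; exfalso; simp at h; omega

-- B's first loop computes pvP
theorem pv_pairs_eq (data : List Int) :
    data.reverse.foldl
      (fun L x => L ++ L.map (fun p => (p.1 + 1, PySem.Int.bxor x p.2))) [((0 : Int), (0 : Int))]
    = pvP data := by
  induction data with
  | nil => rfl
  | cons x r ih => simp [List.foldl_append, ih, pvP]

-- shifting A's inner fold by an already-selected first element
theorem pv_shift (zs : List (Int × Int)) (t c : Int) :
    zs.foldl pvStepA (some t, c)
    = (some (match (zs.foldl pvStepA (none, 0)).1 with
             | none => t
             | some v => PySem.Int.bxor t v),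
       c + (zs.foldl pvStepA (none, 0)).2) := by
  induction zs generalizing t c with
  | nil => simp
  | cons z rest ih =>
    by_cases hb : z.1 == 1
    · simp only [List.foldl_cons, pvStepA, hb, if_pos]
      rw [ih (PySem.Int.bxor t z.2) (c + 1), ih z.2 (0 + 1)]
      rcases h0 : (rest.foldl pvStepA (none, 0)).1 with _ | v <;>
        simp [pv_bxor_assoc] <;> ring
    · simp only [List.foldl_cons, pvStepA, hb, if_neg, Bool.false_eq_true, not_false_iff]
      exact ih t c

def pvEmbed (p : Int × Int) : Option Int × Int :=
  (if p.1 = 0 then none else some p.2, p.1)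

-- the stream of A's per-tuple inner results, in product order, is pvP data
theorem pv_stream (data : List Int) :
    (pvProdBits data.length).map (fun bs => (bs.zip data).foldl pvStepA (none, (0 : Int)))
    = (pvP data).map pvEmbed := by
  induction data with
  | nil => simp [pvProdBits, pvP, pvEmbed]
  | cons x r ih =>
    show (([0, 1] : List Int).flatMap _).map _ = _
    rw [List.map_flatMap]
    simp only [List.flatMap_cons, List.flatMap_nil, List.append_nil, List.map_map]
    have h0 : ((pvProdBits r.length).map
        ((fun bs => (bs.zip (x :: r)).foldl pvStepA (none, (0 : Int))) ∘ fun bs => (0 : Int) :: bs))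
        = (pvP r).map pvEmbed := by
      rw [← ih]; apply List.map_congr_left; intro bs _
      simp [pvStepA]
    have h1 : ((pvProdBits r.length).map
        ((fun bs => (bs.zip (x :: r)).foldl pvStepA (none, (0 : Int))) ∘ fun bs => (1 : Int) :: bs))
        = (pvP r).map (fun p => pvEmbed (p.1 + 1, PySem.Int.bxor x p.2)) := by
      have hstep : ((pvProdBits r.length).map
          ((fun bs => (bs.zip (x :: r)).foldl pvStepA (none, (0 : Int))) ∘ fun bs => (1 : Int) :: bs))
          = ((pvProdBits r.length).map (fun bs => (bs.zip r).foldl pvStepA (none, (0 : Int)))).map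
              (fun s => (some (match s.1 with
                               | none => x
                               | some v => PySem.Int.bxor x v), s.2 + 1)) := by
        rw [List.map_map]; apply List.map_congr_left; intro bs _
        simp only [Function.comp]
        show ((1, x) :: bs.zip r).foldl pvStepA (none, 0) = _
        simp only [List.foldl_cons, pvStepA, show ((1 : Int) == 1) = true from rfl, if_true]
        rw [pv_shift]
        simp [add_comm]
      rw [hstep, ih, List.map_map]
      apply List.map_congr_left; intro p hp
      have hinv := pvP_inv r p hp
      by_cases h : p.1 = 0
      · have h2 := hinv.2 h
        simp [pvEmbed, h, h2]
      · simp [pvEmbed, h]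
        omega
    rw [h0, h1, pvP, List.map_append, List.map_map]
    rfl

theorem calcXOR_eq_alt (data : List Int) : calcXOR data = calcXOR_alt data := by
  unfold calcXOR calcXOR_alt
  rw [pv_pairs_eq]
  rw [show (pvProdBits data.length).foldl
        (fun d bs => pvBodyA d ((bs.zip data).foldl pvStepA (none, 0)))
        PySem.Dict.empty
      = ((pvProdBits data.length).map
          (fun bs => (bs.zip data).foldl pvStepA (none, (0 : Int)))).foldl
          pvBodyA PySem.Dict.empty from (List.foldl_map).symm]
  rw [pv_stream, List.foldl_map]
  congr 1
  apply PySem.List.foldl_congr_mem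
  intro d p hp
  have hinv := pvP_inv data p hp
  by_cases h : p.1 = 0
  · simp [pvEmbed, pvBodyA, h]
  · simp [pvEmbed, pvBodyA, h, (by omega : 0 < p.1)]

-- ===== VERDICT (by name: the statement is the Claim_ definition above) =====
theorem calcXOR_spec : Claim_equal_calcXOR := by
  intro data _
  show calcXOR data = calcXOR_alt data
  exact calcXOR_eq_alt data
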